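-- pv_equiv track=rewrite | github.com/breandan/cstk | scripts/reranker_local/train.py | levenshtein_align
-- ===== SOURCE A (Python) =====
-- from typing import List, Tuple
--
-- def levenshtein_align(a: List[str], b: List[str]) -> List[int]:
--     """0=match, 1=ins, 2=sub, 3=del (same coding as your LaTeX table)."""
--     m, n = len(a), len(b)
--     dp = [[0]*(n+1) for _ in range(m+1)]
--     for i in range(m+1): dp[i][0] = i
--     for j in range(n+1): dp[0][j] = j
--     for i in range(1, m+1):
--         for j in range(1, n+1):
--             cost_sub = 0 if a[i-1] == b[j-1] else 2
--             dp[i][j] = min(dp[i-1][j]+1, dp[i][j-1]+1, dp[i-1][j-1]+cost_sub)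
--     la, i, j = [0]*n, m, n
--     while j or i:
--         if i and j and dp[i][j] == dp[i-1][j-1] + (0 if a[i-1]==b[j-1] else 2):
--             la[j-1] = 0 if a[i-1]==b[j-1] else 2; i, j = i-1, j-1
--         elif j and (i==0 or dp[i][j] == dp[i][j-1]+1):
--             la[j-1] = 1; j -= 1
--         else:                                           # deletion in doc
--             i -= 1                                     # (=skip in b)
--     return la                                          # len = |b|
-- ===== SOURCE B (Python) =====
-- from typing import List
--
-- def levenshtein_align(a: List[str], b: List[str]) -> List[int]:
--     """0=match, 1=ins, 2=sub, 3=del — same coding as the original."""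
--     m, n = len(a), len(b)
--     # backpointer matrix: the op each cell emits (0 match, 2 sub, 1 ins, 3 del)
--     bp = [[1] * (n + 1) for _ in range(m + 1)]
--     bp[0][0] = 0
--     # DP costs kept only two rows at a time; decisions recorded in bp
--     prev = list(range(n + 1))
--     for i in range(1, m + 1):
--         row = bp[i]
--         row[0] = 3
--         cur = [i] + [0] * n
--         for j in range(1, n + 1):
--             cs = 0 if a[i - 1] == b[j - 1] else 2
--             d, ins, dele = prev[j - 1] + cs, cur[j - 1] + 1, prev[j] + 1
--             best = min(dele, ins, d)
--             cur[j] = best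
--             row[j] = cs if best == d else (1 if best == ins else 3)
--         prev = cur
--     la, i, j = [0] * n, m, n
--     while i or j:
--         mv = bp[i][j]
--         if mv == 3:
--             i -= 1
--         elif mv == 1:
--             la[j - 1] = 1
--             j -= 1
--         else:
--             la[j - 1] = mv
--             i, j = i - 1, j - 1
--     return la
-- ===== Notes on version B (the rewrite author's own statement) =====
-- stated objective: alternative
-- what changed: B records a backpointer/op matrix during the DP fill (keeping only two cost rows instead of the full cost matrix) and the traceback becomes a plain pointer walk over it, instead of A's full dp matrix plus a traceback that re-derives each move by recomputing the min comparisons.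
import Mathlib
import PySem

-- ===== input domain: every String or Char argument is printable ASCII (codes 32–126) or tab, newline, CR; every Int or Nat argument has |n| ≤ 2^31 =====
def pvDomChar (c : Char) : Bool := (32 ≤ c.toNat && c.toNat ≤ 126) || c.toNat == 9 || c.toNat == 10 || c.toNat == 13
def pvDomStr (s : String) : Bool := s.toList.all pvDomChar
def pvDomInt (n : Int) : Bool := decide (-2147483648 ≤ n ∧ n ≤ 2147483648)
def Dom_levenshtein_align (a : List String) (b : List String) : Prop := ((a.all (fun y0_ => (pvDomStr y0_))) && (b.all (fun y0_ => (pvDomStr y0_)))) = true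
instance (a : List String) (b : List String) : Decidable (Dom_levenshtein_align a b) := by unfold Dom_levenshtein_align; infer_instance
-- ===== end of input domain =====

-- B records a backpointer matrix during the DP fill (keeping only two cost rows) so the
-- traceback is a plain pointer walk; same O(m*n) cost, alternative structure.

-- ===== PORT A =====
-- shared tiny helpers (both Pythons contain these expressions verbatim)
def pvCost (x y : String) : Int := if x == y then 0 else 2

def pvRow0 (n : Nat) : List Int := (List.range (n+1)).map Int.ofNat

def pvGet2 (dp : List (List Int)) (i j : Nat) : Int := (dp.getD i []).getD j 0

-- inner loop of A's DP fill: walks prev row (prevRest = prev[j..]), diag = prev[j-1], left = cur[j-1]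
def pvRowA (ai : String) : List String → Int → Int → List Int → List Int
  | [], _, _, _ => []
  | _ :: _, _, _, [] => []   -- unreachable: prev row always long enough
  | bj :: bs, diag, left, up :: rest =>
      let c := min (up + 1) (min (left + 1) (diag + pvCost ai bj))
      c :: pvRowA ai bs up c rest

-- outer loop of A's DP fill: builds rows 1..m, each row starts with dp[i][0] = i
def pvRowsA (b : List String) : List String → Int → List Int → List (List Int)
  | [], _, _ => []
  | ai :: arest, i, prev =>
      let row := i :: pvRowA ai b (prev.headD 0) i prev.tail
      row :: pvRowsA b arest (i+1) row

-- A's traceback, recomputing the min-comparisons against dp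
def pvTraceA (a b : List String) (dp : List (List Int)) (i j : Nat) (la : List Int) : List Int :=
  if i = 0 ∧ j = 0 then la
  else if i ≠ 0 ∧ j ≠ 0 ∧ pvGet2 dp i j = pvGet2 dp (i-1) (j-1) + pvCost (a.getD (i-1) "") (b.getD (j-1) "") then
    pvTraceA a b dp (i-1) (j-1) (la.set (j-1) (pvCost (a.getD (i-1) "") (b.getD (j-1) "")))
  else if j ≠ 0 ∧ (i = 0 ∨ pvGet2 dp i j = pvGet2 dp i (j-1) + 1) then
    pvTraceA a b dp i (j-1) (la.set (j-1) 1)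
  else
    pvTraceA a b dp (i-1) j la
termination_by i + j
decreasing_by all_goals omega

def levenshtein_align (a : List String) (b : List String) : List Int :=
  let row0 := pvRow0 b.length
  let dp := row0 :: pvRowsA b a 1 row0
  pvTraceA a b dp a.length b.length (List.replicate b.length 0)

-- ===== PORT B =====
-- inner loop of B's fill: returns (cost row, move row); move = op the cell emits
def pvRowB (ai : String) : List String → Int → Int → List Int → List Int × List Int
  | [], _, _, _ => ([], [])
  | _ :: _, _, _, [] => ([], [])   -- unreachable
  | bj :: bs, diag, left, up :: rest =>
      let cs := pvCost ai bj
      let d := diag + cs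
      let ins := left + 1
      let del := up + 1
      let best := min del (min ins d)
      let mv := if best = d then cs else if best = ins then (1 : Int) else 3
      let r := pvRowB ai bs up best rest
      (best :: r.1, mv :: r.2)

-- outer loop of B's fill: keeps only the previous cost row, accumulates bp rows
def pvRowsB (b : List String) : List String → Int → List Int → List (List Int)
  | [], _, _ => []
  | ai :: arest, i, prev =>
      let r := pvRowB ai b (prev.headD 0) i prev.tail
      (3 :: r.2) :: pvRowsB b arest (i+1) (i :: r.1)

-- B's traceback: a pointer walk reading bp (fuel = i+j bounds the iterations; never exhausted)
def pvTraceB (bp : List (List Int)) : Nat → Nat → Nat → List Int → List Int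
  | 0, _, _, la => la
  | fuel+1, i, j, la =>
      if i = 0 ∧ j = 0 then la
      else
        let mv := pvGet2 bp i j
        if mv = 3 then pvTraceB bp fuel (i-1) j la
        else if mv = 1 then pvTraceB bp fuel i (j-1) (la.set (j-1) 1)
        else pvTraceB bp fuel (i-1) (j-1) (la.set (j-1) mv)

def levenshtein_align_alt (a : List String) (b : List String) : List Int :=
  let n := b.length
  let bp := (0 :: List.replicate n 1) :: pvRowsB b a 1 (pvRow0 n)
  pvTraceB bp (a.length + n) a.length n (List.replicate n 0)

-- ===== PRECONDITION & SPEC =====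
def Spec_levenshtein_align (a : List String) (b : List String) (out : List Int) : Prop := out = levenshtein_align_alt a b
instance (a : List String) (b : List String) (out : List Int) : Decidable (Spec_levenshtein_align a b out) := by unfold Spec_levenshtein_align; infer_instance

-- ===== CLAIM (what is proved, stated in full; the proofs are below) =====
def Claim_equal_levenshtein_align : Prop := ∀ (a : List String) (b : List String), Dom_levenshtein_align a b → Spec_levenshtein_align a b (levenshtein_align a b)

-- ===== LEMMAS AND PROOFS =====

-- the textbook DP recurrence; used only as the common specification of both fills
def dpF (a b : List String) : Nat → Nat → Int
  | 0, j => (j : Int)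
  | i+1, 0 => (i : Int) + 1
  | i+1, j+1 => min (dpF a b i (j+1) + 1) (min (dpF a b (i+1) j + 1) (dpF a b i j + pvCost (a.getD i "") (b.getD j "")))
termination_by i j => i + j

-- the move B's fill records at cell (i+1, j+1), as a function of dpF
def pvMv (a b : List String) (i j : Nat) : Int :=
  let cs := pvCost (a.getD i "") (b.getD j "")
  if dpF a b (i+1) (j+1) = dpF a b i j + cs then cs
  else if dpF a b (i+1) (j+1) = dpF a b (i+1) j + 1 then 1 else 3

lemma dpF_zero (a b : List String) (j : Nat) : dpF a b 0 j = (j : Int) := by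
  simp [dpF]

lemma dpF_succ_zero (a b : List String) (i : Nat) : dpF a b (i+1) 0 = (i : Int) + 1 := by
  simp [dpF]

lemma dpF_succ_succ (a b : List String) (i j : Nat) :
    dpF a b (i+1) (j+1) = min (dpF a b i (j+1) + 1) (min (dpF a b (i+1) j + 1) (dpF a b i j + pvCost (a.getD i "") (b.getD j ""))) := by
  rw [dpF]

lemma getD_drop (b : List String) (j0 : Nat) (x : String) (xs : List String)
    (h : b.drop j0 = x :: xs) : b.getD j0 "" = x := by
  have h1 : b[j0]? = some x := by
    rw [← List.head?_drop, h]; rfl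
  simp [List.getD, h1]

lemma pvRow0_getD (n t : Nat) (ht : t ≤ n) : (pvRow0 n).getD t 0 = (t : Int) := by
  have h : t < n+1 := by omega
  rw [pvRow0, List.getD_eq_getElem _ _ (by simpa using h), List.getElem_map, List.getElem_range]
  rfl

lemma pvRow0_length (n : Nat) : (pvRow0 n).length = n + 1 := by
  simp [pvRow0]

lemma pvRowA_length (ai : String) :
    ∀ (bs : List String) (diag left : Int) (rest : List Int), rest.length = bs.length →
      (pvRowA ai bs diag left rest).length = bs.length := by
  intro bs
  induction bs with
  | nil => intro _ _ rest _; simp [pvRowA]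
  | cons bj bs ih =>
    intro diag left rest hlen
    cases rest with
    | nil => simp at hlen
    | cons up rest =>
      have hl : rest.length = bs.length := by simp at hlen; omega
      simp [pvRowA, ih _ _ _ hl]

lemma pvRowA_spec (a b : List String) (i : Nat) :
    ∀ (bs : List String) (j0 : Nat) (prevRest : List Int) (diag left : Int),
      b.drop j0 = bs →
      prevRest.length = bs.length →
      (∀ t, t < bs.length → prevRest.getD t 0 = dpF a b i (j0 + 1 + t)) →
      diag = dpF a b i j0 →
      left = dpF a b (i+1) j0 →
      ∀ k, k < bs.length →
        (pvRowA (a.getD i "") bs diag left prevRest).getD k 0 = dpF a b (i+1) (j0 + 1 + k) := by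
  intro bs
  induction bs with
  | nil => intro j0 prevRest diag left _ _ _ _ _ k hk; simp at hk
  | cons bj bs ih =>
    intro j0 prevRest diag left hdrop hlen hprev hdiag hleft k hk
    cases prevRest with
    | nil => simp at hlen
    | cons up rest =>
      have hbj : b.getD j0 "" = bj := getD_drop b j0 bj bs hdrop
      have hup : up = dpF a b i (j0 + 1) := by
        have := hprev 0 (by simp)
        simpa using this
      have hc : min (up + 1) (min (left + 1) (diag + pvCost (a.getD i "") bj)) = dpF a b (i+1) (j0+1) := by
        rw [dpF_succ_succ, hup, hdiag, hleft, hbj]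
      simp only [pvRowA]
      cases k with
      | zero => simpa using hc
      | succ k' =>
        simp only [List.getD_cons_succ]
        have hdrop' : b.drop (j0 + 1) = bs := by
          have : b.drop (j0+1) = (b.drop j0).drop 1 := by
            rw [List.drop_drop]
          rw [this, hdrop]; rfl
        have := ih (j0+1) rest up (min (up + 1) (min (left + 1) (diag + pvCost (a.getD i "") bj)))
          hdrop' (by simp at hlen ⊢; omega)
          (fun t ht => by
            have := hprev (t+1) (by simp at hlen ⊢; omega)
            simp only [List.getD_cons_succ] at this
            rw [this]; congr 1; omega)
          hup hc k' (by simp at hk; omega)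
        rw [this]; congr 1; omega

lemma pvRowsA_spec (a b : List String) :
    ∀ (arest : List String) (i0 : Nat) (prev : List Int),
      a.drop i0 = arest →
      prev.length = b.length + 1 →
      (∀ t, t ≤ b.length → prev.getD t 0 = dpF a b i0 t) →
      ∀ di j, di < arest.length → j ≤ b.length →
        ((pvRowsA b arest ((i0 : Int)+1) prev).getD di []).getD j 0 = dpF a b (i0+1+di) j := by
  intro arest
  induction arest with
  | nil => intro _ _ _ _ _ di _ hdi _; simp at hdi
  | cons ai arest ih =>
    intro i0 prev hdrop hlen hprev di j hdi hj
    have hai : a.getD i0 "" = ai := getD_drop a i0 ai arest hdrop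
    cases prev with
    | nil => simp at hlen
    | cons p0 ptl =>
      have hp0 : p0 = dpF a b i0 0 := by
        have := hprev 0 (by omega); simpa using this
      have hptl : ∀ t, t < b.length → ptl.getD t 0 = dpF a b i0 (0 + 1 + t) := by
        intro t ht
        have := hprev (t+1) (by omega)
        simp only [List.getD_cons_succ] at this
        rw [this]; congr 1; omega
      have hlen' : ptl.length = b.length := by simp at hlen; omega
      have hrow : ∀ t, t ≤ b.length →
          (((i0 : Int) + 1) :: pvRowA ai b ((p0 :: ptl).headD 0) ((i0 : Int)+1) (p0 :: ptl).tail).getD t 0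
            = dpF a b (i0+1) t := by
        intro t ht
        cases t with
        | zero => simp [dpF_succ_zero]
        | succ t' =>
          simp only [List.getD_cons_succ, List.headD_cons, List.tail_cons]
          rw [← hai]
          have := pvRowA_spec a b i0 b 0 ptl p0 ((i0 : Int)+1) (by simp) hlen'
            hptl hp0 (dpF_succ_zero a b i0).symm t' (by omega)
          rw [this]; congr 1; omega
      simp only [pvRowsA]
      cases di with
      | zero =>
        simp only [List.getD_cons_zero]
        have := hrow j hj
        simp only [List.headD_cons, List.tail_cons] at this ⊢
        rw [this]
      | succ di' =>
        simp only [List.getD_cons_succ]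
        have hdrop' : a.drop (i0 + 1) = arest := by
          have : a.drop (i0+1) = (a.drop i0).drop 1 := by rw [List.drop_drop]
          rw [this, hdrop]; rfl
        have hlenrow : (((i0 : Int) + 1) :: pvRowA ai b ((p0 :: ptl).headD 0) ((i0 : Int)+1) (p0 :: ptl).tail).length = b.length + 1 := by
          simp only [List.length_cons, List.headD_cons, List.tail_cons]
          rw [pvRowA_length ai b _ _ ptl hlen']
        have hcast : ((i0 : Int) + 1) + 1 = (((i0+1 : Nat) : Int) + 1) := by push_cast; ring
        have := ih (i0+1) _ hdrop' hlenrow hrow di' j (by simp at hdi; omega) hj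
        rw [hcast]
        simp only [List.headD_cons, List.tail_cons] at this ⊢
        rw [this]; congr 1; omega

lemma pvRowB_fst (ai : String) :
    ∀ (bs : List String) (diag left : Int) (rest : List Int),
      (pvRowB ai bs diag left rest).1 = pvRowA ai bs diag left rest := by
  intro bs
  induction bs with
  | nil => intro _ _ rest; cases rest <;> simp [pvRowB, pvRowA]
  | cons bj bs ih =>
    intro diag left rest
    cases rest with
    | nil => simp [pvRowB, pvRowA]
    | cons up rest =>
      simp only [pvRowB, pvRowA, List.cons.injEq]
      exact ⟨trivial, ih _ _ _⟩

lemma pvRowB_moves (a b : List String) (i : Nat) :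
    ∀ (bs : List String) (j0 : Nat) (prevRest : List Int) (diag left : Int),
      b.drop j0 = bs →
      prevRest.length = bs.length →
      (∀ t, t < bs.length → prevRest.getD t 0 = dpF a b i (j0 + 1 + t)) →
      diag = dpF a b i j0 →
      left = dpF a b (i+1) j0 →
      ∀ k, k < bs.length →
        (pvRowB (a.getD i "") bs diag left prevRest).2.getD k 0 = pvMv a b i (j0 + k) := by
  intro bs
  induction bs with
  | nil => intro j0 prevRest diag left _ _ _ _ _ k hk; simp at hk
  | cons bj bs ih =>
    intro j0 prevRest diag left hdrop hlen hprev hdiag hleft k hk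
    cases prevRest with
    | nil => simp at hlen
    | cons up rest =>
      have hbj : b.getD j0 "" = bj := getD_drop b j0 bj bs hdrop
      have hup : up = dpF a b i (j0 + 1) := by
        have := hprev 0 (by simp)
        simpa using this
      have hc : min (up + 1) (min (left + 1) (diag + pvCost (a.getD i "") bj)) = dpF a b (i+1) (j0+1) := by
        rw [dpF_succ_succ, hup, hdiag, hleft, hbj]
      simp only [pvRowB]
      cases k with
      | zero =>
        simp only [List.getD_cons_zero, Nat.add_zero]
        simp only [pvMv, hbj]
        rw [← hdiag, ← hleft, ← hc]
      | succ k' =>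
        simp only [List.getD_cons_succ]
        have hdrop' : b.drop (j0 + 1) = bs := by
          have : b.drop (j0+1) = (b.drop j0).drop 1 := by rw [List.drop_drop]
          rw [this, hdrop]; rfl
        have := ih (j0+1) rest up (min (up + 1) (min (left + 1) (diag + pvCost (a.getD i "") bj)))
          hdrop' (by simp at hlen ⊢; omega)
          (fun t ht => by
            have := hprev (t+1) (by simp at hlen ⊢; omega)
            simp only [List.getD_cons_succ] at this
            rw [this]; congr 1; omega)
          hup hc k' (by simp at hk; omega)
        rw [this]; congr 1; omega

lemma pvRowsB_spec (a b : List String) :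
    ∀ (arest : List String) (i0 : Nat) (prev : List Int),
      a.drop i0 = arest →
      prev.length = b.length + 1 →
      (∀ t, t ≤ b.length → prev.getD t 0 = dpF a b i0 t) →
      ∀ di j, di < arest.length → j ≤ b.length →
        ((pvRowsB b arest ((i0 : Int)+1) prev).getD di []).getD j 0 =
          (if j = 0 then 3 else pvMv a b (i0+di) (j-1)) := by
  intro arest
  induction arest with
  | nil => intro _ _ _ _ _ di _ hdi _; simp at hdi
  | cons ai arest ih =>
    intro i0 prev hdrop hlen hprev di j hdi hj
    have hai : a.getD i0 "" = ai := getD_drop a i0 ai arest hdrop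
    cases prev with
    | nil => simp at hlen
    | cons p0 ptl =>
      have hp0 : p0 = dpF a b i0 0 := by
        have := hprev 0 (by omega); simpa using this
      have hptl : ∀ t, t < b.length → ptl.getD t 0 = dpF a b i0 (0 + 1 + t) := by
        intro t ht
        have := hprev (t+1) (by omega)
        simp only [List.getD_cons_succ] at this
        rw [this]; congr 1; omega
      have hlen' : ptl.length = b.length := by simp at hlen; omega
      simp only [pvRowsB]
      cases di with
      | zero =>
        simp only [List.getD_cons_zero]
        cases j with
        | zero => simp
        | succ t' =>
          simp only [List.getD_cons_succ, List.headD_cons, List.tail_cons]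
          rw [← hai]
          have := pvRowB_moves a b i0 b 0 ptl p0 ((i0 : Int)+1) (by simp) hlen'
            hptl hp0 (dpF_succ_zero a b i0).symm t' (by omega)
          rw [this]
          simp
      | succ di' =>
        simp only [List.getD_cons_succ]
        have hdrop' : a.drop (i0 + 1) = arest := by
          have : a.drop (i0+1) = (a.drop i0).drop 1 := by rw [List.drop_drop]
          rw [this, hdrop]; rfl
        have hrow : ∀ t, t ≤ b.length →
            ((((i0 : Int) + 1) :: (pvRowB ai b ((p0 :: ptl).headD 0) ((i0 : Int)+1) (p0 :: ptl).tail).1).getD t 0)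
              = dpF a b (i0+1) t := by
          intro t ht
          cases t with
          | zero => simp [dpF_succ_zero]
          | succ t' =>
            simp only [List.getD_cons_succ, List.headD_cons, List.tail_cons, pvRowB_fst]
            rw [← hai]
            have := pvRowA_spec a b i0 b 0 ptl p0 ((i0 : Int)+1) (by simp) hlen'
              hptl hp0 (dpF_succ_zero a b i0).symm t' (by omega)
            rw [this]; congr 1; omega
        have hlenrow : ((((i0 : Int) + 1) :: (pvRowB ai b ((p0 :: ptl).headD 0) ((i0 : Int)+1) (p0 :: ptl).tail).1)).length = b.length + 1 := by
          simp only [List.length_cons, List.headD_cons, List.tail_cons, pvRowB_fst]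
          rw [pvRowA_length ai b _ _ ptl hlen']
        have hcast : ((i0 : Int) + 1) + 1 = (((i0+1 : Nat) : Int) + 1) := by push_cast; ring
        have := ih (i0+1) _ hdrop' hlenrow hrow di' j (by simp at hdi; omega) hj
        rw [hcast]
        simp only [List.headD_cons, List.tail_cons] at this ⊢
        rw [this]
        have : i0 + 1 + di' = i0 + (di' + 1) := by omega
        rw [this]

lemma dpA_get (a b : List String) :
    ∀ i j, i ≤ a.length → j ≤ b.length →
      pvGet2 (pvRow0 b.length :: pvRowsA b a 1 (pvRow0 b.length)) i j = dpF a b i j := by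
  intro i j hi hj
  cases i with
  | zero =>
    simp only [pvGet2, List.getD_cons_zero]
    rw [pvRow0_getD b.length j hj, dpF_zero]
  | succ i' =>
    simp only [pvGet2, List.getD_cons_succ]
    have h1 : ((1 : Int)) = ((0 : Nat) : Int) + 1 := by norm_num
    have := pvRowsA_spec a b a 0 (pvRow0 b.length) (by simp)
      (by rw [pvRow0_length])
      (fun t ht => by rw [pvRow0_getD b.length t ht, dpF_zero])
      i' j (by omega) hj
    rw [h1, this]
    congr 1; omega

lemma pvCost_cases (x y : String) : pvCost x y = 0 ∨ pvCost x y = 2 := by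
  unfold pvCost; split <;> simp

lemma trace_eq (a b : List String) (dp bp : List (List Int))
    (hdp : ∀ i j, i ≤ a.length → j ≤ b.length → pvGet2 dp i j = dpF a b i j)
    (hbp0 : ∀ j, j < b.length → pvGet2 bp 0 (j+1) = 1)
    (hbpi : ∀ i, i < a.length → pvGet2 bp (i+1) 0 = 3)
    (hbpm : ∀ i j, i < a.length → j < b.length → pvGet2 bp (i+1) (j+1) = pvMv a b i j) :
    ∀ N i j la, i + j ≤ N → i ≤ a.length → j ≤ b.length →
      pvTraceB bp N i j la = pvTraceA a b dp i j la := by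
  intro N
  induction N with
  | zero =>
    intro i j la hN hi hj
    have hi0 : i = 0 := by omega
    have hj0 : j = 0 := by omega
    subst hi0; subst hj0
    rw [pvTraceA]
    simp [pvTraceB]
  | succ N ihN =>
    intro i j la hN hi hj
    cases i with
    | zero =>
      cases j with
      | zero => rw [pvTraceA]; simp [pvTraceB]
      | succ j' =>
        have hmv : pvGet2 bp 0 (j'+1) = 1 := hbp0 j' (by omega)
        rw [pvTraceA]
        simp only [pvTraceB, hmv]
        norm_num
        exact ihN 0 j' _ (by omega) (by omega) (by omega)
    | succ i' =>
      cases j with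
      | zero =>
        have hmv : pvGet2 bp (i'+1) 0 = 3 := hbpi i' (by omega)
        rw [pvTraceA]
        simp only [pvTraceB, hmv]
        norm_num
        exact ihN i' 0 _ (by omega) (by omega) (by omega)
      | succ j' =>
        have hmv : pvGet2 bp (i'+1) (j'+1) = pvMv a b i' j' := hbpm i' j' (by omega) (by omega)
        have e1 : pvGet2 dp (i'+1) (j'+1) = dpF a b (i'+1) (j'+1) := hdp _ _ hi hj
        have e2 : pvGet2 dp i' j' = dpF a b i' j' := hdp _ _ (by omega) (by omega)
        have e3 : pvGet2 dp (i'+1) j' = dpF a b (i'+1) j' := hdp _ _ (by omega) (by omega)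
        rw [pvTraceA]
        simp only [pvTraceB, hmv, Nat.add_sub_cancel, e1, e2, e3, pvMv]
        rcases pvCost_cases (a.getD i' "") (b.getD j' "") with h | h <;>
        · simp only [h]
          split_ifs <;>
            first
              | rfl
              | omega
              | exact ihN i' j' _ (by omega) (by omega) (by omega)
              | exact ihN (i'+1) j' _ (by omega) (by omega) (by omega)
              | exact ihN i' (j'+1) _ (by omega) (by omega) (by omega)
              | tauto

-- ===== VERDICT (by name: the statement is the Claim_ definition above) =====
theorem levenshtein_align_spec : Claim_equal_levenshtein_align := by
  unfold Claim_equal_levenshtein_align Spec_levenshtein_align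
  intro a b _
  show levenshtein_align a b = levenshtein_align_alt a b
  rw [levenshtein_align, levenshtein_align_alt]
  refine (trace_eq a b _ _ (dpA_get a b) ?_ ?_ ?_ (a.length + b.length) a.length b.length
    (List.replicate b.length 0) (by omega) (by omega) (by omega)).symm
  · intro j hj
    simp only [pvGet2, List.getD_cons_zero, List.getD_cons_succ]
    rw [List.getD_eq_getElem _ _ (by simpa using hj)]
    simp
  · intro i hi
    simp only [pvGet2, List.getD_cons_succ]
    have h1 : ((1 : Int)) = ((0 : Nat) : Int) + 1 := by norm_num
    have := pvRowsB_spec a b a 0 (pvRow0 b.length) (by simp)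
      (by rw [pvRow0_length])
      (fun t ht => by rw [pvRow0_getD b.length t ht, dpF_zero])
      i 0 (by omega) (by omega)
    rw [h1, this]
    simp
  · intro i j hi hj
    simp only [pvGet2, List.getD_cons_succ]
    have h1 : ((1 : Int)) = ((0 : Nat) : Int) + 1 := by norm_num
    have := pvRowsB_spec a b a 0 (pvRow0 b.length) (by simp)
      (by rw [pvRow0_length])
      (fun t ht => by rw [pvRow0_getD b.length t ht, dpF_zero])
      i (j+1) (by omega) (by omega)
    rw [h1, this]
    simp
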